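-- pv_equiv track=rewrite | github.com/asshat1981ar/aura-cli | tests/test_performance_simulations.py | _compress_to_budget
-- ===== SOURCE A (Python) =====
-- from typing import Any, Dict, List
--
-- def _compress_to_budget(entries: List[str], max_tokens: int) -> List[str]:
--     """Inline reimplementation to test without a live DB."""
--     budget = max_tokens * 4
--     selected, used = [], 0
--     for entry in reversed(entries):
--         if used + len(entry) + 1 > budget:
--             break
--         selected.append(entry)
--         used += len(entry) + 1
--     return list(reversed(selected))
-- ===== SOURCE B (Python) =====
-- from typing import Any, Dict, List
--
-- def _compress_to_budget(entries: List[str], max_tokens: int) -> List[str]: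
--     """Suffix cumulative weights + binary search for the cut instead of scan-until-break."""
--     cum = []
--     total = 0
--     for e in reversed(entries):
--         total += len(e) + 1
--         cum.append(total)
--     budget = max_tokens * 4
--     lo, hi = 0, len(cum)
--     while lo < hi:
--         mid = (lo + hi) // 2
--         if cum[mid] <= budget:
--             lo = mid + 1
--         else:
--             hi = mid
--     return entries[len(entries) - lo:]
-- ===== Notes on version B (the rewrite author's own statement) =====
-- stated objective: alternative
-- what changed: Replaces the reversed accumulate-until-break scan with building the cumulative suffix-weight table once and binary-searching it for the largest number of trailing entries that fit, then returning one slice.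
import Mathlib
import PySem

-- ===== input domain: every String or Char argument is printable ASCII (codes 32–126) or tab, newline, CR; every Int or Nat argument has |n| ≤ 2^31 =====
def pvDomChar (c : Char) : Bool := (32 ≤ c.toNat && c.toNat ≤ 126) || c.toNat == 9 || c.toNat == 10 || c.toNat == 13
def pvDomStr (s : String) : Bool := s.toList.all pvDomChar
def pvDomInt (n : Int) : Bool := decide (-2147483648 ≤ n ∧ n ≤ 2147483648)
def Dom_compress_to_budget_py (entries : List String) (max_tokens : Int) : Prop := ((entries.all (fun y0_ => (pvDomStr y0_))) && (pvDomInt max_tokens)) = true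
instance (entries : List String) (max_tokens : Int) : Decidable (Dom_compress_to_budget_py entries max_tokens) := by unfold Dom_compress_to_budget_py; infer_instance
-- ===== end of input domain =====

-- B builds the cumulative suffix-weight table and binary-searches it for the cut instead of A's scan-until-break (alternative decomposition, same cost).


-- ===== PORT A =====
-- the for-loop over reversed(entries) with break, state (used, selected)
def pvLoopA : List String → Int → Int → List String → List String
  | [], _, _, selected => selected
  | e :: rest, budget, used, selected =>
    if used + PySem.Str.len e + 1 > budget then selected
    else pvLoopA rest budget (used + PySem.Str.len e + 1) (selected ++ [e])

def compress_to_budget_py (entries : List String) (max_tokens : Int) : List String :=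
  (pvLoopA entries.reverse (max_tokens * 4) 0 []).reverse

-- ===== PORT B =====
-- cum-building loop: state (total, cum), appending the running total
def pvCumB (rev : List String) : List Int :=
  (rev.foldl (fun (st : Int × List Int) e =>
    (st.1 + PySem.Str.len e + 1, st.2 ++ [st.1 + PySem.Str.len e + 1])) (0, [])).2

-- the while lo < hi binary-search loop; cum[mid] is always in range (0 ≤ mid < hi ≤ len cum), so getD is exact
def pvBsearch (cum : List Int) (budget : Int) (lo hi : Nat) : Nat :=
  if lo < hi then
    let mid := (lo + hi) / 2
    if cum.getD mid 0 ≤ budget then pvBsearch cum budget (mid + 1) hi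
    else pvBsearch cum budget lo mid
  else lo
termination_by hi - lo
decreasing_by all_goals omega

def compress_to_budget_py_alt (entries : List String) (max_tokens : Int) : List String :=
  let cum := pvCumB entries.reverse
  let k := pvBsearch cum (max_tokens * 4) 0 cum.length
  -- entries[len(entries)-k:]: k ≤ len, so the index is in [0, len] and the slice is drop
  entries.drop (entries.length - k)

-- ===== PRECONDITION & SPEC =====
def Spec_compress_to_budget_py (entries : List String) (max_tokens : Int) (out : List String) : Prop := out = compress_to_budget_py_alt entries max_tokens
instance (entries : List String) (max_tokens : Int) (out : List String) : Decidable (Spec_compress_to_budget_py entries max_tokens out) := by unfold Spec_compress_to_budget_py; infer_instance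

-- ===== CLAIM (what is proved, stated in full; the proofs are below) =====
def Claim_equal_compress_to_budget_py : Prop := ∀ (entries : List String) (max_tokens : Int), Dom_compress_to_budget_py entries max_tokens → Spec_compress_to_budget_py entries max_tokens (compress_to_budget_py entries max_tokens)

-- ===== LEMMAS AND PROOFS =====

-- weight of an entry
def pvW (e : String) : Int := PySem.Str.len e + 1

theorem pvW_pos (e : String) : 0 < pvW e := by
  simp [pvW, PySem.Str.len_eq]

-- pure cumulative-sum list starting from t
def pvCumP : List String → Int → List Int
  | [], _ => []
  | e :: rest, t => (t + pvW e) :: pvCumP rest (t + pvW e)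

-- greedy count: how many leading elements of ws fit
def pvG : List String → Int → Int → Nat
  | [], _, _ => 0
  | e :: rest, budget, used =>
    if used + pvW e > budget then 0 else 1 + pvG rest budget (used + pvW e)

theorem pvLoopA_eq_take (rev : List String) : ∀ (budget used : Int) (sel : List String),
    pvLoopA rev budget used sel = sel ++ rev.take (pvG rev budget used) := by
  induction rev with
  | nil => intro _ _ _; simp [pvLoopA, pvG]
  | cons e rest ih =>
    intro budget used sel
    simp only [pvLoopA, pvG, pvW, ← add_assoc]
    split_ifs with h
    · simp
    · rw [ih]
      simp [Nat.one_add, List.take_succ_cons]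

theorem pvCumB_foldl (rev : List String) : ∀ (t : Int) (acc : List Int),
    rev.foldl (fun (st : Int × List Int) e =>
      (st.1 + PySem.Str.len e + 1, st.2 ++ [st.1 + PySem.Str.len e + 1])) (t, acc)
    = (t + (rev.map pvW).sum, acc ++ pvCumP rev t) := by
  induction rev with
  | nil => intro t acc; simp [pvCumP]
  | cons e rest ih =>
    intro t acc
    simp only [List.foldl_cons, ih, pvCumP, pvW, Prod.mk.injEq, List.map_cons, List.sum_cons]
    constructor
    · ring
    · simp [add_assoc]

theorem pvCumB_eq (rev : List String) : pvCumB rev = pvCumP rev 0 := by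
  show (rev.foldl _ (0, [])).2 = _
  rw [pvCumB_foldl]
  simp

theorem pvCumP_length (ws : List String) : ∀ t, (pvCumP ws t).length = ws.length := by
  induction ws with
  | nil => simp [pvCumP]
  | cons e rest ih => intro t; simp [pvCumP, ih]

theorem pvCumP_lb (ws : List String) : ∀ (t : Int) (i : Nat), i < ws.length →
    t < (pvCumP ws t).getD i 0 := by
  induction ws with
  | nil => simp
  | cons e rest ih =>
    intro t i hi
    cases i with
    | zero => simpa [pvCumP] using pvW_pos e
    | succ j =>
      have := ih (t + pvW e) j (by simpa using hi)
      have := pvW_pos e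
      simp only [pvCumP, List.getD_cons_succ]
      omega

theorem pvG_spec (ws : List String) : ∀ (budget t : Int),
    pvG ws budget t ≤ ws.length ∧
    (∀ i, i < pvG ws budget t → (pvCumP ws t).getD i 0 ≤ budget) ∧
    (∀ i, pvG ws budget t ≤ i → i < ws.length → budget < (pvCumP ws t).getD i 0) := by
  induction ws with
  | nil => intro budget t; simp [pvG]
  | cons e rest ih =>
    intro budget t
    by_cases h : t + pvW e > budget
    · refine ⟨by simp [pvG, h], by simp [pvG, h], ?_⟩
      intro i _ hi
      cases i with
      | zero => simp [pvCumP, h]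
      | succ j =>
        have hb := pvCumP_lb rest (t + pvW e) j (by simpa using hi)
        simp only [pvCumP, List.getD_cons_succ]
        omega
    · obtain ⟨ih1, ih2, ih3⟩ := ih budget (t + pvW e)
      refine ⟨by simp [pvG, h]; omega, ?_, ?_⟩
      · intro i hi
        cases i with
        | zero => simp [pvCumP]; omega
        | succ j =>
          simp only [pvG, if_neg h] at hi
          exact (by simpa [pvCumP] using ih2 j (by omega))
      · intro i hgi hi
        cases i with
        | zero => simp [pvG, if_neg h] at hgi
        | succ j =>
          simp only [pvG, if_neg h] at hgi
          exact (by simpa [pvCumP] using ih3 j (by omega) (by simpa using hi))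

theorem pvBsearch_eq (cum : List Int) (budget : Int) (g : Nat)
    (h1 : ∀ i, i < g → cum.getD i 0 ≤ budget)
    (h2 : ∀ i, g ≤ i → i < cum.length → budget < cum.getD i 0) :
    ∀ (n lo hi : Nat), hi - lo = n → lo ≤ g → g ≤ hi → hi ≤ cum.length →
      pvBsearch cum budget lo hi = g := by
  intro n
  induction n using Nat.strong_induction_on with
  | _ n ih =>
    intro lo hi hn hlo hg hhi
    unfold pvBsearch
    by_cases hlt : lo < hi
    · simp only [if_pos hlt]
      set mid := (lo + hi) / 2 with hmid
      have hm1 : lo ≤ mid := by omega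
      have hm2 : mid < hi := by omega
      by_cases hc : cum.getD mid 0 ≤ budget
      · have hmg : mid < g := by
          by_contra hng
          exact absurd hc (by simpa using h2 mid (by omega) (by omega))
        simp only [if_pos hc]
        exact ih (hi - (mid + 1)) (by omega) (mid + 1) hi rfl (by omega) hg hhi
      · have hgm : g ≤ mid := by
          by_contra hng
          exact hc (h1 mid (by omega))
        simp only [if_neg hc]
        exact ih (mid - lo) (by omega) lo mid rfl hlo hgm (by omega)
    · simp only [if_neg hlt]; omega

-- ===== VERDICT (by name: the statement is the Claim_ definition above) =====
theorem compress_to_budget_py_spec : Claim_equal_compress_to_budget_py := by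
  intro entries max_tokens _
  unfold Spec_compress_to_budget_py compress_to_budget_py compress_to_budget_py_alt
  obtain ⟨hgle, h1, h2⟩ := pvG_spec entries.reverse (max_tokens * 4) 0
  have hbs : pvBsearch (pvCumB entries.reverse) (max_tokens * 4) 0 (pvCumB entries.reverse).length
      = pvG entries.reverse (max_tokens * 4) 0 := by
    rw [pvCumB_eq]
    exact pvBsearch_eq _ _ _ h1
      (fun i hg hi => h2 i hg (by rwa [pvCumP_length] at hi))
      _ 0 _ rfl (Nat.zero_le _) (by rw [pvCumP_length]; exact hgle) (le_refl _)
  simp only [hbs]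
  rw [pvLoopA_eq_take, List.nil_append, List.reverse_take]
  simp
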